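-- pv_equiv track=rewrite | github.com/carolus-rex/onedriver | utils.py | shortfilename
-- ===== SOURCE A (Python) =====
-- def shortfilename(filename, initials_counts):
--     invalid_chars = """"/\\[]:;=,"""
--
--     if len(filename) > 8 or ' ' in filename:
--         filename = filename.upper()
--
--         new_filename = ''
--         extension = ''
--         past_extension = ''
--
--         corrupted = False
--
--         last_dot_index = None
--         second_last_dot_index = None
--
--         for index, char in enumerate(filename):
--             if char not in invalid_chars and char != ' ':
--                 if char == '.':
--                     past_extension = extension
--                     extension = ''
--                     second_last_dot_index = last_dot_index
--                     last_dot_index = index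
--                     corrupted = False
--                     continue
--
--                 if last_dot_index is not None:
--                     if len(extension) < 3:
--                         extension += char
--                 else:
--                     if len(new_filename) < 6:
--                         new_filename += char
--             else:
--                 if last_dot_index is not None:
--                     corrupted = True
--                     continue
--
--         initials = new_filename
--
--         try:
--             count = initials_counts[initials]
--         except KeyError:
--             initials_counts[initials] = 0
--             count = 1
--
--         initials_counts[new_filename] += 1
--
--         return new_filename + '~%i' % count + ('.' if (extension or past_extension) else '') + (past_extension if corrupted or len(extension) == 0 else extension)
--
--     else:
--         return ''
-- ===== SOURCE B (Python) =====
-- def shortfilename(filename, initials_counts):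
--     invalid_chars = """"/\\[]:;=,"""
--
--     if len(filename) > 8 or ' ' in filename:
--         filename = filename.upper()
--
--         def keep(seg):
--             return ''.join(c for c in seg if c not in invalid_chars and c != ' ')
--
--         segments = filename.split('.')
--
--         new_filename = keep(segments[0])[:6]
--
--         if len(segments) > 1:
--             last = segments[-1]
--             extension = keep(last)[:3]
--             corrupted = any(c in invalid_chars or c == ' ' for c in last)
--             past_extension = keep(segments[-2])[:3] if len(segments) > 2 else ''
--         else:
--             extension = ''
--             past_extension = ''
--             corrupted = False
--
--         initials = new_filename
--
--         try:
--             count = initials_counts[initials]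
--         except KeyError:
--             initials_counts[initials] = 0
--             count = 1
--
--         initials_counts[new_filename] += 1
--
--         return new_filename + '~%i' % count + ('.' if (extension or past_extension) else '') + (past_extension if corrupted or len(extension) == 0 else extension)
--
--     else:
--         return ''
-- ===== Notes on version B (the rewrite author's own statement) =====
-- stated objective: simpler
-- what changed: Replaces A's single stateful character loop (index tracking, per-dot state resets) by splitting the uppercased name on '.' and computing name/extension/past-extension/corrupted directly from the first, last and second-to-last segments; the counter block and final assembly are kept verbatim.
import Mathlib
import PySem

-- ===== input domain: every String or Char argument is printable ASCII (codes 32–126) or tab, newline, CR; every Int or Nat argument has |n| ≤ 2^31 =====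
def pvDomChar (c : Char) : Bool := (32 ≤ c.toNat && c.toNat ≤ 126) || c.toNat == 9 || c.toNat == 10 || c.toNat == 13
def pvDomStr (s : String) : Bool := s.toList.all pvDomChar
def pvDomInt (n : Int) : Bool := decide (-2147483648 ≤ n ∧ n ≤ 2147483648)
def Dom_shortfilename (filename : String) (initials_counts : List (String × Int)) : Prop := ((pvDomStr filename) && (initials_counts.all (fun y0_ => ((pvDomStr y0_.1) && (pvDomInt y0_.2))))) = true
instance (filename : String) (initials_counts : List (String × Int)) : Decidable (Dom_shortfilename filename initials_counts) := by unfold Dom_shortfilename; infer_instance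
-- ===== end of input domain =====

-- B replaces A's single stateful character loop by splitting the name on '.' and reading the
-- name/extension/past-extension/corrupted fields off the first, last and second-to-last segments
-- (objective: simpler). Both Pythons mutate the initials_counts dict identically; the equivalence
-- proved here is about the RETURN value (the Lean ports take the dict as a read-only assoc list).


-- ===== PORT A =====
-- invalid_chars = '"/\[]:;=,'
def aInvalidChars : List Char := "\"/\\[]:;=,".toList

-- the for-loop over enumerate(filename): state (new_filename, extension, past_extension,
-- corrupted, last_dot_index, second_last_dot_index), returning the four values the result uses
def aLoop : List (Int × Char) → List Char → List Char → List Char → Bool → Option Int → Option Int →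
    List Char × List Char × List Char × Bool
  | [], nf, ext, pext, cor, _, _ => (nf, ext, pext, cor)
  | (idx, c) :: rest, nf, ext, pext, cor, ldi, sldi =>
    if !(aInvalidChars.contains c) && c != ' ' then
      if c == '.' then
        aLoop rest nf [] ext false (some idx) ldi
      else if ldi.isSome then
        if ext.length < 3 then aLoop rest nf (ext ++ [c]) pext cor ldi sldi
        else aLoop rest nf ext pext cor ldi sldi
      else
        if nf.length < 6 then aLoop rest (nf ++ [c]) ext pext cor ldi sldi
        else aLoop rest nf ext pext cor ldi sldi
    else
      if ldi.isSome then aLoop rest nf ext pext true ldi sldi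
      else aLoop rest nf ext pext cor ldi sldi

def shortfilename (filename : String) (initials_counts : List (String × Int)) : String :=
  if (8 : Int) < PySem.Str.len filename ∨ PySem.Str.isIn " " filename = true then
    let f := PySem.Str.upper filename
    let q := aLoop (PySem.List.enumerate f.toList 0) [] [] [] false none none
    let nf := q.1
    let ext := q.2.1
    let pext := q.2.2.1
    let cor := q.2.2.2
    let initials := String.ofList nf
    -- try/except KeyError: on a hit count is the stored value, on a miss count = 1;
    -- the dict mutations (insert 0 / += 1) do not affect the returned string
    let count : Int :=
      match (⟨initials_counts⟩ : PySem.Dict String Int).get? initials with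
      | some v => v
      | none => 1
    String.ofList nf ++ "~" ++ PySem.Int.toStr count ++
      (if ext.length != 0 || pext.length != 0 then "." else "") ++
      (if cor || ext.length == 0 then String.ofList pext else String.ofList ext)
  else ""

-- ===== PORT B =====
def bInvalidChars : List Char := "\"/\\[]:;=,".toList

-- keep(seg): the chars of seg that are neither invalid nor a space
def bKeep (seg : List Char) : List Char := seg.filter (fun c => !(bInvalidChars.contains c) && c != ' ')

-- any(c in invalid_chars or c == ' ' for c in seg)
def bCorrupt (seg : List Char) : Bool := seg.any (fun c => bInvalidChars.contains c || c == ' ')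

def shortfilename_alt (filename : String) (initials_counts : List (String × Int)) : String :=
  if (8 : Int) < PySem.Str.len filename ∨ PySem.Str.isIn " " filename = true then
    let f := PySem.Str.upper filename
    let segs := f.toList.splitOn '.'                            -- filename.split('.')
    let q : List Char × List Char × List Char × Bool :=
      ((bKeep (segs.headD [])).take 6,                          -- keep(segments[0])[:6]
       if 1 < segs.length then
         ((bKeep (segs.getLastD [])).take 3,                    -- keep(segments[-1])[:3]
          if 2 < segs.length then (bKeep (segs.getD (segs.length - 2) [])).take 3 else [],
          bCorrupt (segs.getLastD []))                          -- corrupted from the last segment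
       else ([], [], false))
    let nf := q.1
    let ext := q.2.1
    let pext := q.2.2.1
    let cor := q.2.2.2
    let count : Int :=
      match (⟨initials_counts⟩ : PySem.Dict String Int).get? (String.ofList nf) with
      | some v => v
      | none => 1
    String.ofList nf ++ "~" ++ PySem.Int.toStr count ++
      (if ext.length != 0 || pext.length != 0 then "." else "") ++
      (if cor || ext.length == 0 then String.ofList pext else String.ofList ext)
  else ""

-- ===== PRECONDITION & SPEC =====
def Spec_shortfilename (filename : String) (initials_counts : List (String × Int)) (out : String) : Prop := out = shortfilename_alt filename initials_counts
instance (filename : String) (initials_counts : List (String × Int)) (out : String) : Decidable (Spec_shortfilename filename initials_counts out) := by unfold Spec_shortfilename; infer_instance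

-- ===== CLAIM (what is proved, stated in full; the proofs are below) =====
def Claim_equal_shortfilename : Prop := ∀ (filename : String) (initials_counts : List (String × Int)), Dom_shortfilename filename initials_counts → Spec_shortfilename filename initials_counts (shortfilename filename initials_counts)

-- ===== LEMMAS AND PROOFS =====

-- A's loop with the indices erased: only `last_dot_index.isSome` (seen) matters
def pLoop : List Char → List Char → List Char → List Char → Bool → Bool → List Char × List Char × List Char × Bool
  | [], nf, ext, pext, cor, _ => (nf, ext, pext, cor)
  | c :: rest, nf, ext, pext, cor, seen =>
    if !(aInvalidChars.contains c) && c != ' ' then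
      if c == '.' then pLoop rest nf [] ext false true
      else if seen then
        if ext.length < 3 then pLoop rest nf (ext ++ [c]) pext cor seen
        else pLoop rest nf ext pext cor seen
      else
        if nf.length < 6 then pLoop rest (nf ++ [c]) ext pext cor seen
        else pLoop rest nf ext pext cor seen
    else
      if seen then pLoop rest nf ext pext true seen
      else pLoop rest nf ext pext cor seen

theorem aLoop_eq_pLoop (cs : List Char) (i : Int) (nf ext pext : List Char) (cor : Bool)
    (ldi sldi : Option Int) :
    aLoop (PySem.List.enumerate cs i) nf ext pext cor ldi sldi
      = pLoop cs nf ext pext cor ldi.isSome := by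
  induction cs generalizing i nf ext pext cor ldi sldi with
  | nil => simp [PySem.List.enumerate_nil, aLoop, pLoop]
  | cons c rest ih =>
    rw [PySem.List.enumerate_cons]
    simp only [aLoop, pLoop]
    split_ifs <;> simp [ih]

-- the loop after the first dot, expressed on the '.'-segments of the remaining input
def dotRun : List (List Char) → List Char → List Char → List Char → Bool → List Char × List Char × List Char × Bool
  | [], nf, ext, pext, cor => (nf, ext, pext, cor)
  | [s], nf, ext, pext, cor => (nf, ext ++ (bKeep s).take (3 - ext.length), pext, cor || bCorrupt s)
  | s :: s' :: t, nf, ext, _, _ => dotRun (s' :: t) nf [] (ext ++ (bKeep s).take (3 - ext.length)) false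

-- the loop from the start, expressed on the '.'-segments
def preRun : List (List Char) → List Char → List Char × List Char × List Char × Bool
  | [], nf => (nf, [], [], false)
  | [s], nf => (nf ++ (bKeep s).take (6 - nf.length), [], [], false)
  | s :: s' :: t, nf => dotRun (s' :: t) (nf ++ (bKeep s).take (6 - nf.length)) [] [] false

theorem inv_eq : aInvalidChars = bInvalidChars := rfl

theorem splitOn_ne_nil (a : Char) (cs : List Char) : cs.splitOn a ≠ [] :=
  List.splitOnP_ne_nil _ _

theorem bKeep_nil : bKeep [] = [] := rfl
theorem bCorrupt_nil : bCorrupt [] = false := rfl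

theorem bKeep_cons_valid {c : Char} (h : (!(aInvalidChars.contains c) && c != ' ') = true)
    (s : List Char) : bKeep (c :: s) = c :: bKeep s := by
  simp only [bKeep, List.filter_cons, ← inv_eq, h, if_pos]

theorem bKeep_cons_invalid {c : Char} (h : (!(aInvalidChars.contains c) && c != ' ') = false)
    (s : List Char) : bKeep (c :: s) = bKeep s := by
  simp only [bKeep, List.filter_cons, ← inv_eq, h, Bool.false_eq_true, if_false]

theorem bCorrupt_cons_valid {c : Char} (h : (!(aInvalidChars.contains c) && c != ' ') = true)
    (s : List Char) : bCorrupt (c :: s) = bCorrupt s := by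
  simp only [bCorrupt, List.any_cons, ← inv_eq]
  cases hA : aInvalidChars.contains c <;> cases hB : (c == ' ') <;> simp_all

theorem bCorrupt_cons_invalid {c : Char} (h : (!(aInvalidChars.contains c) && c != ' ') = false)
    (s : List Char) : bCorrupt (c :: s) = true := by
  simp only [bCorrupt, List.any_cons, ← inv_eq]
  cases hA : aInvalidChars.contains c <;> cases hB : (c == ' ') <;> simp_all

-- appending a kept char to a capped accumulator, cap n
theorem cap_append {ext ks : List Char} {c : Char} (n : Nat) :
    ext ++ (c :: ks).take (n - ext.length)
      = (if ext.length < n then ext ++ [c] else ext) ++ ks.take (n - (if ext.length < n then ext ++ [c] else ext).length) := by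
  by_cases h : ext.length < n
  · have h1 : n - ext.length = (n - (ext.length + 1)) + 1 := by omega
    simp [h, h1, List.take_succ_cons]
  · have h1 : n - ext.length = 0 := by omega
    simp [h, h1]

theorem dotRun_modifyHead_valid {c : Char} (h : (!(aInvalidChars.contains c) && c != ' ') = true)
    (segs : List (List Char)) (hne : segs ≠ []) (nf ext pext : List Char) (cor : Bool) :
    dotRun (segs.modifyHead (List.cons c)) nf ext pext cor
      = dotRun segs nf (if ext.length < 3 then ext ++ [c] else ext) pext cor := by
  match segs with
  | [s] =>
    simp only [List.modifyHead, dotRun, bKeep_cons_valid h, bCorrupt_cons_valid h]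
    rw [cap_append 3]
  | s :: s' :: t =>
    simp only [List.modifyHead, dotRun, bKeep_cons_valid h]
    rw [cap_append 3]

theorem dotRun_modifyHead_invalid {c : Char} (h : (!(aInvalidChars.contains c) && c != ' ') = false)
    (segs : List (List Char)) (hne : segs ≠ []) (nf ext pext : List Char) (cor : Bool) :
    dotRun (segs.modifyHead (List.cons c)) nf ext pext cor
      = dotRun segs nf ext pext true := by
  match segs with
  | [s] => simp [dotRun, bKeep_cons_invalid h, bCorrupt_cons_invalid h]
  | s :: s' :: t => simp [dotRun, bKeep_cons_invalid h]

theorem pLoop_true (cs : List Char) (nf ext pext : List Char) (cor : Bool) :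
    pLoop cs nf ext pext cor true = dotRun (cs.splitOn '.') nf ext pext cor := by
  induction cs generalizing nf ext pext cor with
  | nil => simp [List.splitOn_nil, dotRun, pLoop, bKeep_nil, bCorrupt_nil]
  | cons c rest ih =>
    by_cases hv : (!(aInvalidChars.contains c) && c != ' ') = true
    · by_cases hd : c = '.'
      · subst hd
        have hv' : ('.' == '.') = true := by decide
        simp only [pLoop, hv, hv', ih]
        rw [show ('.' :: rest).splitOn '.' = [] :: rest.splitOn '.' by
          simp [List.splitOn, List.splitOnP_cons]]
        cases h : rest.splitOn '.' with
        | nil => exact absurd h (splitOn_ne_nil _ _)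
        | cons s' t => simp [dotRun, bKeep_nil]
      · have hsp : (c :: rest).splitOn '.' = (rest.splitOn '.').modifyHead (List.cons c) := by
          simp [List.splitOn, List.splitOnP_cons, hd]
        have hnd : (c == '.') = false := by simpa using hd
        simp only [pLoop, hv, hnd, Bool.false_eq_true, if_false, if_true]
        rw [hsp, dotRun_modifyHead_valid hv (rest.splitOn '.') (splitOn_ne_nil _ _)]
        by_cases hl : ext.length < 3 <;> simp [hl, ih]
    · have hd : c ≠ '.' := by
        intro he; subst he; exact hv (by decide)
      have hsp : (c :: rest).splitOn '.' = (rest.splitOn '.').modifyHead (List.cons c) := by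
        simp [List.splitOn, List.splitOnP_cons, hd]
      simp only [pLoop, hv, if_true]
      have hv' : (!(aInvalidChars.contains c) && c != ' ') = false := by simpa using hv
      rw [hsp, dotRun_modifyHead_invalid hv' (rest.splitOn '.') (splitOn_ne_nil _ _), ← ih]
      simp

theorem preRun_modifyHead_valid {c : Char} (h : (!(aInvalidChars.contains c) && c != ' ') = true)
    (segs : List (List Char)) (hne : segs ≠ []) (nf : List Char) :
    preRun (segs.modifyHead (List.cons c)) nf
      = preRun segs (if nf.length < 6 then nf ++ [c] else nf) := by
  match segs with
  | [s] =>
    simp only [List.modifyHead, preRun, bKeep_cons_valid h]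
    rw [cap_append 6]
  | s :: s' :: t =>
    simp only [List.modifyHead, preRun, bKeep_cons_valid h]
    rw [cap_append 6]

theorem preRun_modifyHead_invalid {c : Char} (h : (!(aInvalidChars.contains c) && c != ' ') = false)
    (segs : List (List Char)) (hne : segs ≠ []) (nf : List Char) :
    preRun (segs.modifyHead (List.cons c)) nf = preRun segs nf := by
  match segs with
  | [s] => simp [preRun, bKeep_cons_invalid h]
  | s :: s' :: t => simp [preRun, bKeep_cons_invalid h]

theorem pLoop_false (cs : List Char) (nf : List Char) :
    pLoop cs nf [] [] false false = preRun (cs.splitOn '.') nf := by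
  induction cs generalizing nf with
  | nil => simp [List.splitOn_nil, preRun, pLoop, bKeep_nil]
  | cons c rest ih =>
    by_cases hv : (!(aInvalidChars.contains c) && c != ' ') = true
    · by_cases hd : c = '.'
      · subst hd
        have hv' : ('.' == '.') = true := by decide
        simp only [pLoop, hv, hv', pLoop_true]
        rw [show ('.' :: rest).splitOn '.' = [] :: rest.splitOn '.' by
          simp [List.splitOn, List.splitOnP_cons]]
        cases h : rest.splitOn '.' with
        | nil => exact absurd h (splitOn_ne_nil _ _)
        | cons s' t => simp [preRun, bKeep_nil]
      · have hsp : (c :: rest).splitOn '.' = (rest.splitOn '.').modifyHead (List.cons c) := by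
          simp [List.splitOn, List.splitOnP_cons, hd]
        have hnd : (c == '.') = false := by simpa using hd
        simp only [pLoop, hv, hnd, Bool.false_eq_true, if_false]
        rw [hsp, preRun_modifyHead_valid hv (rest.splitOn '.') (splitOn_ne_nil _ _)]
        by_cases hl : nf.length < 6 <;> simp [hl, ih]
    · have hd : c ≠ '.' := by
        intro he; subst he; exact hv (by decide)
      have hsp : (c :: rest).splitOn '.' = (rest.splitOn '.').modifyHead (List.cons c) := by
        simp [List.splitOn, List.splitOnP_cons, hd]
      simp only [pLoop, hv]
      have hv' : (!(aInvalidChars.contains c) && c != ' ') = false := by simpa using hv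
      rw [hsp, preRun_modifyHead_invalid hv' (rest.splitOn '.') (splitOn_ne_nil _ _), ← ih]
      simp

-- dotRun from a fresh extension, characterised by last / second-to-last segment
theorem dotRun_last (t : List (List Char)) : ∀ (s : List Char) (nf pext : List Char),
    dotRun (s :: t) nf [] pext false
      = (nf, (bKeep ((s :: t).getLastD [])).take 3,
         if 1 < (s :: t).length then (bKeep ((s :: t).getD ((s :: t).length - 2) [])).take 3 else pext,
         bCorrupt ((s :: t).getLastD [])) := by
  induction t with
  | nil => intro s nf pext; simp [dotRun]
  | cons s'' t' ih =>
    intro s nf pext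
    rw [show dotRun (s :: s'' :: t') nf [] pext false
          = dotRun (s'' :: t') nf [] ((bKeep s).take 3) false from by simp [dotRun]]
    rw [ih]
    cases t' with
    | nil => simp
    | cons a u =>
      have h1 : 1 < u.length + 1 + 1 := by omega
      have h2 : 1 < u.length + 1 + 1 + 1 := by omega
      have hx : u.length + 1 + 1 + 1 - 2 = (u.length + 1 + 1 - 2) + 1 := by omega
      simp only [List.getLastD_cons, List.length_cons, if_pos h1, if_pos h2, hx,
        List.getD_cons_succ]

theorem preRun_char (segs : List (List Char)) (hne : segs ≠ []) :
    preRun segs []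
      = ((bKeep (segs.headD [])).take 6,
         if 1 < segs.length then
           ((bKeep (segs.getLastD [])).take 3,
            if 2 < segs.length then (bKeep (segs.getD (segs.length - 2) [])).take 3 else [],
            bCorrupt (segs.getLastD []))
         else ([], [], false)) := by
  match segs with
  | [s] => simp [preRun]
  | s :: s' :: t =>
    simp only [preRun, List.nil_append]
    rw [dotRun_last]
    have h1 : 1 < t.length + 1 + 1 := by omega
    simp only [List.headD_cons, List.getLastD_cons, List.length_cons, if_pos h1, Prod.mk.injEq]
    refine ⟨by simp, trivial, ?_, trivial⟩

    by_cases h2 : 1 < t.length + 1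
    · have h3 : 2 < t.length + 1 + 1 := by omega
      have hx : t.length + 1 + 1 - 2 = (t.length + 1 - 2) + 1 := by omega
      rw [if_pos h2, if_pos h3, hx, List.getD_cons_succ]
    · have h3 : ¬ 2 < t.length + 1 + 1 := by omega
      rw [if_neg h2, if_neg h3]

theorem quad_eq (cs : List Char) :
    aLoop (PySem.List.enumerate cs 0) [] [] [] false none none
      = ((bKeep ((cs.splitOn '.').headD [])).take 6,
         if 1 < (cs.splitOn '.').length then
           ((bKeep ((cs.splitOn '.').getLastD [])).take 3,
            if 2 < (cs.splitOn '.').length then (bKeep ((cs.splitOn '.').getD ((cs.splitOn '.').length - 2) [])).take 3 else [],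
            bCorrupt ((cs.splitOn '.').getLastD []))
         else ([], [], false)) := by
  rw [aLoop_eq_pLoop]
  simp only [Option.isSome_none]
  rw [pLoop_false, preRun_char _ (splitOn_ne_nil _ _)]

-- ===== VERDICT (by name: the statement is the Claim_ definition above) =====
set_option maxHeartbeats 2000000 in
theorem shortfilename_spec : Claim_equal_shortfilename := by
  intro filename initials_counts _hdom
  unfold Spec_shortfilename shortfilename shortfilename_alt
  simp only [quad_eq]
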